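-- pv_equiv track=rewrite | github.com/danielbackhouse/MotionWare-Streamline | Version 6/TrimRawData.py | findZoneList
-- ===== SOURCE A (Python) =====
-- def findZoneList(activity):
--     zoneList = list(list())
--     newList = list(list())
--     zoneTwo = list()
--     index = 0
--     counter = 0
--     while index < len(activity):
--         if activity[index] == 0:
--             length, endIndex = findLengthOfZeroSection(activity, index)
--             if length > 20:
--                 if counter:
--                     stitched = False
--                     if length > 800:
--                         if index-zoneList[counter-1][1] < 100:
--                             zoneList[counter-1][1] = endIndex
--                     if index-zoneList[counter-1][1] < 5:
--                         zoneList[counter-1][1] = endIndex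
--                     elif zoneList[counter-1][1]-zoneList[counter-1][0] > 800 and index-zoneList[counter-1][1] < 100:
--                             zoneList[counter-1][1] = endIndex
--                     elif zoneList[counter-1][1]-zoneList[counter-1][0] > 1500 and index-zoneList[counter-1][1] < 300:
--                             zoneList[counter-1][1] = endIndex
--                     else:
--                         zoneTwo = []
--                         zoneTwo.append(index)
--                         zoneTwo.append(endIndex)
--                         zoneList.append(zoneTwo)
--                         counter += 1
--                 else:
--                     zoneTwo.append(index)
--                     zoneTwo.append(endIndex)
--                     zoneList.append(zoneTwo)
--                     counter += 1
--             index = endIndex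
--         else:
--             index += 1
--     for x in zoneList:
--         if x[1]-x[0]>400:
--             newList.append(x)
--     return zoneList, newList
--
-- def findLengthOfZeroSection(activity, index):
--     counter = 0
--     newIndex = index
--     while newIndex < len(activity):
--         if activity[newIndex] == 0:
--             counter += 1
--             newIndex += 1
--         else:
--             return counter, newIndex
--     return counter, newIndex
-- ===== SOURCE B (Python) =====
-- def findZoneList(activity):
--     # Pass 1: collect maximal zero runs longer than 20 samples as (start, end) pairs.
--     runs = []
--     i = 0
--     n = len(activity)
--     while i < n:
--         if activity[i] == 0:
--             j = i
--             while j < n and activity[j] == 0: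
--                 j += 1
--             if j - i > 20:
--                 runs.append((i, j))
--             i = j
--         else:
--             i += 1
--     # Pass 2: stitch runs into zones with a single combined predicate.
--     zones = []
--     for s, e in runs:
--         if zones and stitchable(zones[-1][0], zones[-1][1], s, e):
--             zones[-1][1] = e
--         else:
--             zones.append([s, e])
--     newList = [z for z in zones if z[1] - z[0] > 400]
--     return zones, newList
--
--
-- def stitchable(ps, pe, s, e):
--     gap = s - pe
--     span = pe - ps
--     return gap < 5 or (gap < 100 and (span > 800 or e - s > 800)) or (gap < 300 and span > 1500)
-- ===== Notes on version B (the rewrite author's own statement) =====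
-- stated objective: simpler
-- what changed: Replaced A's single index-juggling while-loop (with its helper scan, mutable counter and four-way mutate-then-reread cascade) by two passes: collect maximal zero runs >20 as (start,end) tuples, then fold one combined stitch predicate over them; newList becomes a filter comprehension.
import Mathlib
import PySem

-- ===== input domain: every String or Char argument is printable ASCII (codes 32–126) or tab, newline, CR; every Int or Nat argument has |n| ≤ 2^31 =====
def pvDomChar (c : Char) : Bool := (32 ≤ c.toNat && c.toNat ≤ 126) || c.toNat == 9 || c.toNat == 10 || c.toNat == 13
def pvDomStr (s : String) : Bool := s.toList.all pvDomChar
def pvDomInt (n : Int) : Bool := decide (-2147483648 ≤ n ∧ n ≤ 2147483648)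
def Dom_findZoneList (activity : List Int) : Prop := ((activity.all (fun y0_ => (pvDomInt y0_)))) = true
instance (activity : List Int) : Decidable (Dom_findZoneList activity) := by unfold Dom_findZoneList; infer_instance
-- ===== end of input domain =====

-- B replaces A's single index-juggling while-loop by two passes — collect zero runs, then fold
-- one combined stitch predicate over them (objective: simpler). Equality is of RETURN VALUES:
-- Python A's newList aliases zoneList's inner lists; here lists are values, so only values compare.
-- The while-loops are ported with a `fuel` bound on the remaining iterations (a totalization
-- guard only: the index strictly increases each iteration, so fuel never runs out early).

-- ===== PORT A =====
-- findLengthOfZeroSection(activity, index): returns (counter, newIndex); the index is kept as a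
-- Nat internally (the loop only ever reaches it with 0 ≤ index).
def findLenA (activity : List Int) (fuel : Nat) (newIndex : Nat) (counter : Int) : Int × Nat :=
  match fuel with
  | 0 => (counter, newIndex)
  | fuel + 1 =>
    if h : newIndex < activity.length then
      if activity[newIndex] = 0 then findLenA activity fuel (newIndex + 1) (counter + 1)
      else (counter, newIndex)
    else (counter, newIndex)

-- the while-loop of findZoneList; state = (index, counter, zoneList)
def loopA (activity : List Int) (fuel : Nat) (index : Nat) (counter : Nat)
    (zoneList : List (List Int)) : List (List Int) :=
  match fuel with
  | 0 => zoneList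
  | fuel + 1 =>
    if h : index < activity.length then
      if activity[index] = 0 then
        let r := findLenA activity (activity.length - index) index 0
        if r.1 > 20 then
          if counter ≠ 0 then
            -- `if length > 800: if index - zoneList[counter-1][1] < 100: …` (separate statement)
            let z1 :=
              if r.1 > 800 ∧ (index : Int) - ((zoneList.getD (counter - 1) []).getD 1 0) < 100 then
                zoneList.modify (counter - 1) (fun row => row.set 1 (r.2 : Int))
              else zoneList
            -- the elif chain re-reads the (possibly mutated) previous zone
            if (index : Int) - ((z1.getD (counter - 1) []).getD 1 0) < 5 then
              loopA activity fuel r.2 counter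
                (z1.modify (counter - 1) (fun row => row.set 1 (r.2 : Int)))
            else if ((z1.getD (counter - 1) []).getD 1 0) - ((z1.getD (counter - 1) []).getD 0 0) > 800 ∧
                (index : Int) - ((z1.getD (counter - 1) []).getD 1 0) < 100 then
              loopA activity fuel r.2 counter
                (z1.modify (counter - 1) (fun row => row.set 1 (r.2 : Int)))
            else if ((z1.getD (counter - 1) []).getD 1 0) - ((z1.getD (counter - 1) []).getD 0 0) > 1500 ∧
                (index : Int) - ((z1.getD (counter - 1) []).getD 1 0) < 300 then
              loopA activity fuel r.2 counter
                (z1.modify (counter - 1) (fun row => row.set 1 (r.2 : Int)))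
            else
              loopA activity fuel r.2 (counter + 1) (z1 ++ [[(index : Int), (r.2 : Int)]])
          else
            loopA activity fuel r.2 (counter + 1) (zoneList ++ [[(index : Int), (r.2 : Int)]])
        else loopA activity fuel r.2 counter zoneList
      else loopA activity fuel (index + 1) counter zoneList
    else zoneList

def findZoneList (activity : List Int) : List (List Int) × List (List Int) :=
  let zoneList := loopA activity activity.length 0 0 []
  let newList := zoneList.foldl
    (fun acc x => if x.getD 1 0 - x.getD 0 0 > 400 then acc ++ [x] else acc) []
  (zoneList, newList)

-- ===== PORT B =====
-- inner `while j < n and activity[j] == 0: j += 1`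
def runEndB (activity : List Int) (fuel : Nat) (j : Nat) : Nat :=
  match fuel with
  | 0 => j
  | fuel + 1 =>
    if h : j < activity.length then
      if activity[j] = 0 then runEndB activity fuel (j + 1) else j
    else j

-- pass 1: maximal zero runs with length > 20, as (start, end) pairs
def zeroRunsB (activity : List Int) (fuel : Nat) (i : Nat) : List (Nat × Nat) :=
  match fuel with
  | 0 => []
  | fuel + 1 =>
    if h : i < activity.length then
      if activity[i] = 0 then
        let j := runEndB activity (activity.length - i) i
        (if j - i > 20 then [(i, j)] else []) ++ zeroRunsB activity fuel j
      else zeroRunsB activity fuel (i + 1)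
    else []

def stitchableB (ps pe s e : Int) : Bool :=
  let gap := s - pe
  let span := pe - ps
  gap < 5 || (gap < 100 && (span > 800 || e - s > 800)) || (gap < 300 && span > 1500)

-- pass 2: one step of the stitch fold (`zones[-1][1] = e` / `zones.append([s, e])`)
def stepB (zones : List (List Int)) (r : Nat × Nat) : List (List Int) :=
  match zones.getLast? with
  | some prev =>
    if stitchableB (prev.getD 0 0) (prev.getD 1 0) (r.1 : Int) (r.2 : Int) then
      zones.dropLast ++ [prev.set 1 (r.2 : Int)]
    else zones ++ [[(r.1 : Int), (r.2 : Int)]]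
  | none => zones ++ [[(r.1 : Int), (r.2 : Int)]]

def findZoneList_alt (activity : List Int) : List (List Int) × List (List Int) :=
  let zones := (zeroRunsB activity activity.length 0).foldl stepB []
  (zones, zones.filter (fun z => z.getD 1 0 - z.getD 0 0 > 400))

-- ===== PRECONDITION & SPEC =====
def Spec_findZoneList (activity : List Int) (out : List (List Int) × List (List Int)) : Prop := out = findZoneList_alt activity
instance (activity : List Int) (out : List (List Int) × List (List Int)) : Decidable (Spec_findZoneList activity out) := by unfold Spec_findZoneList; infer_instance

-- ===== CLAIM (what is proved, stated in full; the proofs are below) =====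
def Claim_equal_findZoneList : Prop := ∀ (activity : List Int), Dom_findZoneList activity → Spec_findZoneList activity (findZoneList activity)

-- ===== LEMMAS AND PROOFS =====

theorem runEndB_le (activity : List Int) (fuel : Nat) :
    ∀ j, j ≤ runEndB activity fuel j := by
  induction fuel with
  | zero => intro j; simp [runEndB]
  | succ fuel ih =>
    intro j
    rw [runEndB]
    by_cases h : j < activity.length
    · by_cases hz : activity[j] = 0
      · simp only [h, hz, dif_pos, if_pos]
        have := ih (j + 1); omega
      · simp [h, hz]
    · simp [h]

-- findLenA computes (#zeros, runEndB): same scan, counting vs. recording the stop index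
theorem findLenA_eq (activity : List Int) (fuel : Nat) :
    ∀ i (c : Int), findLenA activity fuel i c
      = (c + ((runEndB activity fuel i : Int) - (i : Int)), runEndB activity fuel i) := by
  induction fuel with
  | zero => intro i c; simp [findLenA, runEndB]
  | succ fuel ih =>
    intro i c
    rw [findLenA, runEndB]
    by_cases h : i < activity.length
    · by_cases hz : activity[i] = 0
      · simp only [h, hz, dif_pos, if_pos]
        rw [ih]
        have : c + 1 + ((runEndB activity fuel (i + 1) : Int) - ((i : Nat) + 1 : Nat))
            = c + ((runEndB activity fuel (i + 1) : Int) - (i : Nat)) := by push_cast; ring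
        rw [this]
      · simp [h, hz]
    · simp [h]

theorem modify_concat {α : Type} (ws : List α) (p : α) (f : α → α) :
    (ws ++ [p]).modify ws.length f = ws ++ [f p] := by
  induction ws with
  | nil => rfl
  | cons a ws ih => simpa [List.modify] using ih

theorem getD_concat {α : Type} (ws : List α) (p d : α) :
    (ws ++ [p]).getD ws.length d = p := by
  simp [List.getD]

-- shape invariant: every zone built is a literal two-element list [s, e]
def GoodZones (zs : List (List Int)) : Prop := ∀ z ∈ zs, ∃ s e : Int, z = [s, e]

theorem goodZones_nil : GoodZones [] := by intro z hz; cases hz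

theorem goodZones_concat (zs : List (List Int)) (hg : GoodZones zs) (s e : Int) :
    GoodZones (zs ++ [[s, e]]) := by
  intro z hzmem
  rcases List.mem_append.mp hzmem with hzin | hzin
  · exact hg z hzin
  · exact ⟨s, e, List.mem_singleton.mp hzin⟩

theorem goodZones_front (ws : List (List Int)) (p : List Int) (hg : GoodZones (ws ++ [p])) :
    GoodZones ws := by
  intro z hzmem; exact hg z (List.mem_append.mpr (Or.inl hzmem))

-- stepB on a nonempty zone list whose last zone is [ps, pe]
theorem stepB_concat (ws : List (List Int)) (ps pe : Int) (r : Nat × Nat) :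
    stepB (ws ++ [[ps, pe]]) r =
      if stitchableB ps pe (r.1 : Int) (r.2 : Int) then ws ++ [[ps, (r.2 : Int)]]
      else (ws ++ [[ps, pe]]) ++ [[(r.1 : Int), (r.2 : Int)]] := by
  simp only [stepB, List.getLast?_concat, List.dropLast_concat]
  rfl

theorem stepB_nil (r : Nat × Nat) : stepB [] r = [[(r.1 : Int), (r.2 : Int)]] := rfl

-- core: A's while-loop from index i on state zs (counter = |zs|) equals B's fold of the
-- remaining runs over zs, fuel running in lockstep
theorem loopA_eq_fold (activity : List Int) :
    ∀ (k i : Nat) (zs : List (List Int)), GoodZones zs →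
      loopA activity k i zs.length zs = (zeroRunsB activity k i).foldl stepB zs := by
  intro k
  induction k with
  | zero => intro i zs _; simp [loopA, zeroRunsB]
  | succ k ih =>
    intro i zs hg
    by_cases h : i < activity.length
    · by_cases hz : activity[i] = 0
      · -- zero cell: one run processed by both sides
        obtain ⟨j, hj⟩ : ∃ j, runEndB activity (activity.length - i) i = j := ⟨_, rfl⟩
        have hle : i ≤ j := hj ▸ runEndB_le activity (activity.length - i) i
        rw [loopA, zeroRunsB]
        simp only [h, hz, dif_pos, if_pos, findLenA_eq, hj, zero_add]
        by_cases hlen : ((j : Int) - (i : Int)) > 20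
        · have hlenN : j - i > 20 := by omega
          rw [if_pos hlen, if_pos hlenN]
          rcases List.eq_nil_or_concat zs with hnil | ⟨ws, p, hws⟩
          · -- counter = 0: both append the first zone
            subst hnil
            rw [if_neg (by simp)]
            simp only [List.nil_append, List.singleton_append, List.foldl_cons, stepB_nil]
            exact ih j [[(i : Int), (j : Int)]] (goodZones_concat [] goodZones_nil _ _)
          · -- counter ≠ 0: previous zone is p = [ps, pe]
            rw [List.concat_eq_append] at hws
            obtain ⟨ps, pe, hp⟩ := hg p (by rw [hws]; simp)
            subst hws; subst hp
            have hgw : GoodZones ws := goodZones_front ws _ hg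
            have hlen2 : (ws ++ [[ps, pe]]).length = (ws ++ [[ps, (j : Int)]]).length := by simp
            rw [if_pos (show (ws ++ [[ps, pe]]).length ≠ 0 by simp)]
            have hcount : (ws ++ [[ps, pe]]).length - 1 = ws.length := by simp
            simp only [hcount, getD_concat, modify_concat, List.singleton_append,
              List.foldl_cons, stepB_concat,
              show ([ps, pe] : List Int).getD 1 0 = pe from rfl]
            -- the 800-extension statement, then the elif chain
            by_cases h800 : ((j : Int) - (i : Int)) > 800 ∧ (i : Int) - pe < 100
            · -- first statement mutates; gap to the new end j is < 5, so the chain re-sets it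
              simp only [if_pos h800, getD_concat, modify_concat,
                show ([ps, pe] : List Int).set 1 (j : Int) = [ps, (j : Int)] from rfl,
                show ([ps, (j : Int)] : List Int).getD 1 0 = (j : Int) from rfl,
                show ([ps, (j : Int)] : List Int).getD 0 0 = ps from rfl,
                show ([ps, (j : Int)] : List Int).set 1 (j : Int) = [ps, (j : Int)] from rfl]
              rw [if_pos (show (i : Int) - (j : Int) < 5 by omega)]
              rw [hlen2, ih j _ (goodZones_concat ws hgw _ _)]
              rw [if_pos (show stitchableB ps pe (i : Int) (j : Int) = true by
                simp only [stitchableB, Bool.or_eq_true, Bool.and_eq_true, decide_eq_true_eq]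
                omega)]
            · -- no pre-mutation: the chain reads the original [ps, pe]
              simp only [if_neg h800, getD_concat,
                show ([ps, pe] : List Int).getD 1 0 = pe from rfl,
                show ([ps, pe] : List Int).getD 0 0 = ps from rfl]
              by_cases hc1 : (i : Int) - pe < 5
              · rw [if_pos hc1]
                simp only [modify_concat,
                  show ([ps, pe] : List Int).set 1 (j : Int) = [ps, (j : Int)] from rfl]
                rw [hlen2, ih j _ (goodZones_concat ws hgw _ _)]
                rw [if_pos (show stitchableB ps pe (i : Int) (j : Int) = true by
                  simp only [stitchableB, Bool.or_eq_true, Bool.and_eq_true, decide_eq_true_eq]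
                  omega)]
              · rw [if_neg hc1]
                by_cases hc2 : pe - ps > 800 ∧ (i : Int) - pe < 100
                · rw [if_pos hc2]
                  simp only [modify_concat,
                    show ([ps, pe] : List Int).set 1 (j : Int) = [ps, (j : Int)] from rfl]
                  rw [hlen2, ih j _ (goodZones_concat ws hgw _ _)]
                  rw [if_pos (show stitchableB ps pe (i : Int) (j : Int) = true by
                    simp only [stitchableB, Bool.or_eq_true, Bool.and_eq_true, decide_eq_true_eq]
                    omega)]
                · rw [if_neg hc2]
                  by_cases hc3 : pe - ps > 1500 ∧ (i : Int) - pe < 300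
                  · rw [if_pos hc3]
                    simp only [modify_concat,
                      show ([ps, pe] : List Int).set 1 (j : Int) = [ps, (j : Int)] from rfl]
                    rw [hlen2, ih j _ (goodZones_concat ws hgw _ _)]
                    rw [if_pos (show stitchableB ps pe (i : Int) (j : Int) = true by
                      simp only [stitchableB, Bool.or_eq_true, Bool.and_eq_true, decide_eq_true_eq]
                      omega)]
                  · rw [if_neg hc3]
                    rw [show (ws ++ [[ps, pe]]).length + 1
                        = ((ws ++ [[ps, pe]]) ++ [[(i : Int), (j : Int)]]).length by simp]
                    rw [ih j _ (goodZones_concat _ hg _ _)]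
                    rw [if_neg (show ¬ stitchableB ps pe (i : Int) (j : Int) = true by
                      simp only [stitchableB, Bool.or_eq_true, Bool.and_eq_true, decide_eq_true_eq]
                      omega)]
        · -- short run: skipped by both
          have hlenN : ¬ j - i > 20 := by omega
          rw [if_neg hlen, if_neg hlenN, List.nil_append]
          exact ih j zs hg
      · -- nonzero cell: both step to i + 1
        rw [loopA, zeroRunsB]
        simp only [h, hz, dif_pos]
        exact ih (i + 1) zs hg
    · rw [loopA, zeroRunsB]; simp [h]

-- ===== VERDICT (by name: the statement is the Claim_ definition above) =====
theorem findZoneList_spec : Claim_equal_findZoneList := by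
  intro activity _
  unfold Spec_findZoneList findZoneList findZoneList_alt
  have hz := loopA_eq_fold activity activity.length 0 [] goodZones_nil
  simp only [List.length_nil] at hz
  simp only [hz, PySem.List.foldl_append_ite_eq_filter, List.nil_append]
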